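-- pv_equiv track=rewrite | github.com/King-play/Paper_Review_Attack_Detection | src/utils.py | extract_metadata_info
-- ===== SOURCE A (Python) =====
-- from typing import Dict, Any, List, Optional, Union, Tuple
--
-- def extract_metadata_info(metadata: Dict) -> Dict:
--     """提取有用的元数据信息"""
--     if not isinstance(metadata, dict):
--         return {}
--
--     useful_fields = ['title', 'author', 'subject', 'keywords', 'creator', 'producer']
--     result = {}
--
--     for field in useful_fields:
--         if field in metadata and metadata[field]:
--             result[field] = str(metadata[field])
--
--     return result
-- ===== SOURCE B (Python) =====
-- def extract_metadata_info(metadata):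
--     """提取有用的元数据信息"""
--     if not isinstance(metadata, dict):
--         return {}
--     useful = {'title', 'author', 'subject', 'keywords', 'creator', 'producer'}
--     found = {}
--     for field, value in metadata.items():
--         if field in useful and value:
--             found[field] = str(value)
--     return {f: found[f]
--             for f in ('title', 'author', 'subject', 'keywords', 'creator', 'producer')
--             if f in found}
-- ===== Notes on version B (the rewrite author's own statement) =====
-- stated objective: alternative
-- what changed: B makes one pass over metadata.items(), filtering by a set of useful field names into a 'found' dict, then emits the found fields in canonical order; A instead loops over the fixed field list and indexes into metadata per field.
import Mathlib
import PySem

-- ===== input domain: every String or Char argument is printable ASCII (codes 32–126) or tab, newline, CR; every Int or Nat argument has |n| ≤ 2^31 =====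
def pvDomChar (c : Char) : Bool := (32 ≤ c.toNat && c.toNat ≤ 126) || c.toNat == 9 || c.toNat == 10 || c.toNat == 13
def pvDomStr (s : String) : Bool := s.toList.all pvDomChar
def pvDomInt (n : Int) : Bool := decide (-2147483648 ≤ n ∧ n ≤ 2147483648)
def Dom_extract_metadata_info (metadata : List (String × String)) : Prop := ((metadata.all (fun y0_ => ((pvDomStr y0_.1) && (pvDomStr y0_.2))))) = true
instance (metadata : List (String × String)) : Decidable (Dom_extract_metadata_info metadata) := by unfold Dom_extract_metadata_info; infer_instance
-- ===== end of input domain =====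

-- B scans metadata.items() once, filtering by a set of useful field names into a
-- 'found' dict, then emits the found fields in canonical order; A loops over the
-- fixed field list indexing into metadata. Alternative decomposition, same values.

-- ===== PORT A =====
-- for field in useful_fields: if field in metadata and metadata[field]: result[field] = str(metadata[field])
def extract_metadata_info (metadata : List (String × String)) : List (String × String) :=
  (["title", "author", "subject", "keywords", "creator", "producer"].foldl
    (fun (result : PySem.Dict String String) field =>
      match (PySem.Dict.mk metadata).get? field with
      | some v => if v ≠ "" then result.insert field v else result
      | none => result)
    PySem.Dict.empty).items

-- ===== PORT B =====
-- useful = {'title', 'author', 'subject', 'keywords', 'creator', 'producer'}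
def pvUseful : PySem.Set String :=
  PySem.Set.ofList ["title", "author", "subject", "keywords", "creator", "producer"]

-- for field, value in metadata.items(): if field in useful and value: found[field] = str(value)
-- then {f: found[f] for f in (...) if f in found}
def extract_metadata_info_alt (metadata : List (String × String)) : List (String × String) :=
  let found : PySem.Dict String String :=
    metadata.foldl
      (fun (d : PySem.Dict String String) kv =>
        if pvUseful.contains kv.1 && kv.2 != "" then d.insert kv.1 kv.2 else d)
      PySem.Dict.empty
  ["title", "author", "subject", "keywords", "creator", "producer"].filterMap
    (fun f => (found.get? f).map (fun v => (f, v)))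

-- ===== PRECONDITION & SPEC =====
-- Pre_ excludes association lists with duplicate keys: a Python dict has unique keys,
-- so such lists do not faithfully represent any input A receives (lookup order there is
-- a representation artefact: first match for A's port, last write for B's pass).
def Pre_extract_metadata_info (metadata : List (String × String)) : Prop :=
  (metadata.map Prod.fst).Nodup
instance (metadata : List (String × String)) : Decidable (Pre_extract_metadata_info metadata) := by unfold Pre_extract_metadata_info; infer_instance
def pvWitness_extract_metadata_info : (List (String × String)) :=
  [("title", "A Paper"), ("pages", "3"), ("author", "")]

def Spec_extract_metadata_info (metadata : List (String × String)) (out : List (String × String)) : Prop := out = extract_metadata_info_alt metadata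
instance (metadata : List (String × String)) (out : List (String × String)) : Decidable (Spec_extract_metadata_info metadata out) := by unfold Spec_extract_metadata_info; infer_instance

-- ===== CLAIM (what is proved, stated in full; the proofs are below) =====
def Claim_equal_extract_metadata_info : Prop := ∀ (metadata : List (String × String)), Dom_extract_metadata_info metadata → Pre_extract_metadata_info metadata → Spec_extract_metadata_info metadata (extract_metadata_info metadata)

-- ===== LEMMAS AND PROOFS =====

-- A's accumulator loop over fresh, distinct fields appends exactly the kept pairs.
theorem foldl_step_items (g : String → Option String) :
    ∀ (fs : List String) (d : PySem.Dict String String), fs.Nodup →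
      (∀ f ∈ fs, d.contains f = false) →
      (fs.foldl
        (fun (result : PySem.Dict String String) field =>
          match g field with
          | some v => if v ≠ "" then result.insert field v else result
          | none => result) d).items
      = d.items ++ fs.filterMap
          (fun field =>
            match g field with
            | some v => if v = "" then none else some (field, v)
            | none => none) := by
  intro fs
  induction fs with
  | nil => intro d _ _; simp
  | cons f fs ih =>
    intro d hnd hc
    have hcf : d.contains f = false := hc f (by simp)
    have hnd' : fs.Nodup := hnd.of_cons
    have hfmem : f ∉ fs := (List.nodup_cons.mp hnd).1
    simp only [List.foldl_cons, List.filterMap_cons]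
    cases hg : g f with
    | none =>
      rw [ih d hnd' (fun x hx => hc x (by simp [hx]))]
    | some v =>
      by_cases hv : v = ""
      · simp only [hv, ne_eq, not_true_eq_false, if_false, if_true]
        rw [ih d hnd' (fun x hx => hc x (by simp [hx]))]
      · simp only [ne_eq, hv, not_false_eq_true, if_true]
        have hc' : ∀ x ∈ fs, (d.insert f v).contains x = false := by
          intro x hx
          rw [PySem.Dict.contains_insert]
          have hxf : (x == f) = false := by
            simp only [beq_eq_false_iff_ne]; rintro rfl; exact hfmem hx
          simp [hxf, hc x (by simp [hx])]
        rw [ih (d.insert f v) hnd' hc']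
        simp [PySem.Dict.items_insert, hcf]

-- keys never touched by B's pass keep their binding
theorem foldl_B_untouched :
    ∀ (ms : List (String × String)) (d : PySem.Dict String String) (f : String),
      f ∉ ms.map Prod.fst →
      (ms.foldl
        (fun (d : PySem.Dict String String) kv =>
          if pvUseful.contains kv.1 && kv.2 != "" then d.insert kv.1 kv.2 else d) d).get? f
      = d.get? f := by
  intro ms
  induction ms with
  | nil => intro d f _; rfl
  | cons kv ms ih =>
    intro d f hf
    simp only [List.map_cons, List.mem_cons, not_or] at hf
    simp only [List.foldl_cons]
    by_cases h : (pvUseful.contains kv.1 && kv.2 != "") = true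
    · rw [h, if_pos rfl, ih _ _ hf.2, PySem.Dict.get?_insert_of_ne _ _ hf.1]
    · rw [if_neg (by simpa using h), ih _ _ hf.2]

-- B's single pass, on distinct keys, records exactly A's filtered first-match lookup
theorem foldl_B_get :
    ∀ (ms : List (String × String)) (d : PySem.Dict String String) (f : String),
      (ms.map Prod.fst).Nodup → pvUseful.contains f = true → d.get? f = none →
      (ms.foldl
        (fun (d : PySem.Dict String String) kv =>
          if pvUseful.contains kv.1 && kv.2 != "" then d.insert kv.1 kv.2 else d) d).get? f
      = (match (PySem.Dict.mk ms).get? f with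
         | some v => if v = "" then none else some v
         | none => none) := by
  intro ms
  induction ms with
  | nil => intro d f _ _ hd; simpa [PySem.Dict.get?] using hd
  | cons kv ms ih =>
    intro d f hnd hf hd
    obtain ⟨k, v⟩ := kv
    simp only [List.map_cons, List.nodup_cons] at hnd
    simp only [List.foldl_cons, PySem.Dict.get?_mk_cons]
    by_cases hk : k = f
    · subst hk
      simp only [BEq.rfl, if_pos]
      by_cases hv : v = ""
      · subst hv
        simp only [show (pvUseful.contains k && "" != "") = false by simp, Bool.false_eq_true,
          if_false, if_true]
        exact (foldl_B_untouched ms d k hnd.1).trans hd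
      · simp only [hf, show (v != "") = true by simpa using hv, Bool.and_self, if_true, if_neg hv]
        rw [foldl_B_untouched ms _ k hnd.1, PySem.Dict.get?_insert_self]
    · have hbeq : (k == f) = false := by simpa using hk
      rw [hbeq]
      simp only [Bool.false_eq_true, if_false]
      by_cases h : (pvUseful.contains k && v != "") = true
      · rw [h, if_pos rfl]
        exact ih _ f hnd.2 hf (by rw [PySem.Dict.get?_insert_of_ne _ _ (Ne.symm hk)]; exact hd)
      · rw [if_neg (by simpa using h)]
        exact ih _ f hnd.2 hf hd

-- ===== VERDICT (by name: the statement is the Claim_ definition above) =====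
theorem extract_metadata_info_spec : Claim_equal_extract_metadata_info := by
  intro metadata _ hpre
  unfold Spec_extract_metadata_info extract_metadata_info extract_metadata_info_alt
  rw [foldl_step_items (fun f => (PySem.Dict.mk metadata).get? f) _ PySem.Dict.empty
        (by decide) (by intro f _; simp [PySem.Dict.contains_empty])]
  rw [show (PySem.Dict.empty : PySem.Dict String String).items = [] from rfl, List.nil_append]
  apply List.filterMap_congr
  intro f hfmem
  have hf : pvUseful.contains f = true := by
    fin_cases hfmem <;> decide
  rw [foldl_B_get metadata PySem.Dict.empty f hpre hf (PySem.Dict.get?_empty f)]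
  cases (PySem.Dict.mk metadata).get? f with
  | none => rfl
  | some v => by_cases hv : v = "" <;> simp [hv]
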